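-- pv_equiv track=rewrite | github.com/materialsproject/MPContribs | mpcontribs-lux/mpcontribs/lux/projects/alab/pipelines/data/mongodb_to_parquet.py | _get_experiment_status
-- ===== SOURCE A (Python) =====
-- from typing import Dict, List, Optional, Any
--
-- def _get_experiment_status(tasks: List[Dict]) -> str:
--     """Determine experiment status from tasks"""
--     if not tasks or tasks is None:
--         return 'unknown'
--
--     statuses = [t.get('status', '') for t in tasks]
--
--     if all(s == 'COMPLETED' for s in statuses):
--         return 'completed'
--     elif any(s == 'ERROR' for s in statuses):
--         return 'error'
--     elif any(s in ['RUNNING', 'WAITING'] for s in statuses):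
--         return 'active'
--     else:
--         return 'unknown'
-- ===== SOURCE B (Python) =====
-- def _rank(status):
--     """Severity rank of one task status: ERROR=3 > RUNNING/WAITING=2 > other=1 > COMPLETED=0."""
--     if status == 'ERROR':
--         return 3
--     if status in ('RUNNING', 'WAITING'):
--         return 2
--     if status == 'COMPLETED':
--         return 0
--     return 1
--
--
-- def _get_experiment_status(tasks):
--     """Determine experiment status from tasks"""
--     if not tasks:
--         return 'unknown'
--     worst = 0
--     for t in tasks:
--         worst = max(worst, _rank(t.get('status', '')))
--     return ('completed', 'unknown', 'active', 'error')[worst]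
-- ===== Notes on version B (the rewrite author's own statement) =====
-- stated objective: alternative
-- what changed: B replaces A's three separate all/any scans by a severity lattice: each status is mapped to a numeric rank (ERROR=3 > RUNNING/WAITING=2 > other=1 > COMPLETED=0), one fold takes the maximum rank, and the result is read from a 4-entry table indexed by that maximum.
import Mathlib
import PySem

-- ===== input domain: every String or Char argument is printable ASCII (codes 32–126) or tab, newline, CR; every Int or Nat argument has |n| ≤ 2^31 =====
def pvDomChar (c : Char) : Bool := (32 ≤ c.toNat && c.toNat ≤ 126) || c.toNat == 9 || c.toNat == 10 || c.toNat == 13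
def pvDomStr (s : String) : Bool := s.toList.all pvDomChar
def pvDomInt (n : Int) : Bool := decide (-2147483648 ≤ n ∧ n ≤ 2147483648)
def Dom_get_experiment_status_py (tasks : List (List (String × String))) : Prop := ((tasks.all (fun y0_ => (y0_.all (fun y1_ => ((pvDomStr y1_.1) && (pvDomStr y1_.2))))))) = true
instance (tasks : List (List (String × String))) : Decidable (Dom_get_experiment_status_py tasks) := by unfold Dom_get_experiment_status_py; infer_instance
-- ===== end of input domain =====

-- B replaces A's three all/any scans by a severity ranking: one max-fold over per-status ranks, result read from a 4-entry table (objective: alternative).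

-- t.get('status', '')  (shared by both Pythons verbatim)
def pvStatusOf (t : List (String × String)) : String := (PySem.Dict.mk t).getD "status" ""

-- ===== PORT A =====
def get_experiment_status_py (tasks : List (List (String × String))) : String :=
  if tasks = [] then "unknown"
  else
    let statuses := tasks.map pvStatusOf
    if statuses.all (fun s => s == "COMPLETED") then "completed"
    else if statuses.any (fun s => s == "ERROR") then "error"
    else if statuses.any (fun s => ["RUNNING", "WAITING"].contains s) then "active"
    else "unknown"

-- ===== PORT B =====
-- _rank: severity of one status
def pvRank (status : String) : Nat :=
  if status == "ERROR" then 3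
  else if ["RUNNING", "WAITING"].contains status then 2
  else if status == "COMPLETED" then 0
  else 1

def get_experiment_status_py_alt (tasks : List (List (String × String))) : String :=
  if tasks = [] then "unknown"
  else
    let worst := tasks.foldl (fun w t => max w (pvRank (pvStatusOf t))) 0
    -- Python tuple index ('completed','unknown','active','error')[worst]; worst ≤ 3 always, so it never raises
    ["completed", "unknown", "active", "error"].getD worst ""

-- ===== PRECONDITION & SPEC =====
def Spec_get_experiment_status_py (tasks : List (List (String × String))) (out : String) : Prop := out = get_experiment_status_py_alt tasks
instance (tasks : List (List (String × String))) (out : String) : Decidable (Spec_get_experiment_status_py tasks out) := by unfold Spec_get_experiment_status_py; infer_instance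

-- ===== CLAIM (what is proved, stated in full; the proofs are below) =====
def Claim_equal_get_experiment_status_py : Prop := ∀ (tasks : List (List (String × String))), Dom_get_experiment_status_py tasks → Spec_get_experiment_status_py tasks (get_experiment_status_py tasks)

-- ===== LEMMAS AND PROOFS =====

-- the fold in B is the max of the ranks
theorem pv_foldl_eq_map (tasks : List (List (String × String))) :
    tasks.foldl (fun w t => max w (pvRank (pvStatusOf t))) 0
      = (tasks.map (fun t => pvRank (pvStatusOf t))).foldl max 0 := by
  rw [List.foldl_map]

theorem pv_foldl_max_cases (l : List Nat) (a : Nat) : l.foldl max a = a ∨ l.foldl max a ∈ l := by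
  induction l generalizing a with
  | nil => exact Or.inl rfl
  | cons b t ih =>
    rcases ih (max a b) with h | h
    · simp only [List.foldl_cons] at *
      rw [h]
      rcases Nat.le_total a b with hab | hab
      · exact Or.inr (by simp [Nat.max_eq_right hab])
      · exact Or.inl (Nat.max_eq_left hab)
    · exact Or.inr (List.mem_cons_of_mem _ h)

-- rank facts
theorem pvRank_eq_zero_iff (s : String) : pvRank s = 0 ↔ s = "COMPLETED" := by
  unfold pvRank
  split_ifs with h1 h2 h3 <;> simp_all
  rcases h2 with rfl | rfl <;> simp

theorem pvRank_eq_three_iff (s : String) : pvRank s = 3 ↔ s = "ERROR" := by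
  unfold pvRank; split_ifs <;> simp_all

theorem pvRank_ge_two_iff (s : String) : 2 ≤ pvRank s ↔ (s = "ERROR" ∨ ["RUNNING", "WAITING"].contains s = true) := by
  unfold pvRank
  by_cases h1 : s = "ERROR"
  · simp [h1]
  · by_cases h2 : ["RUNNING", "WAITING"].contains s = true
    · have hd : s = "RUNNING" ∨ s = "WAITING" := by simpa using h2
      simp [h1, hd]
    · simp only [h1, h2]
      split_ifs <;> simp_all

theorem pvRank_le_three (s : String) : pvRank s ≤ 3 := by
  unfold pvRank; split_ifs <;> omega

-- ===== VERDICT (by name: the statement is the Claim_ definition above) =====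
theorem get_experiment_status_py_spec : Claim_equal_get_experiment_status_py := by
  intro tasks _
  unfold Spec_get_experiment_status_py get_experiment_status_py get_experiment_status_py_alt
  by_cases hnil : tasks = []
  · simp [hnil]
  · simp only [if_neg hnil, pv_foldl_eq_map]
    set rs : List Nat := tasks.map (fun t => pvRank (pvStatusOf t)) with hrs
    set W : Nat := rs.foldl max 0 with hW
    have hW3 : W ≤ 3 := by
      rcases pv_foldl_max_cases rs 0 with h | h
      · omega
      · rw [hW]; rw [hrs] at h; rcases List.mem_map.mp h with ⟨t, _, ht⟩
        rw [← ht]; exact pvRank_le_three _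
    have hmem_le : ∀ x ∈ rs, x ≤ W := fun x hx => (PySem.List.le_foldl_max rs 0).2 x hx
    have hWmem : W = 0 ∨ W ∈ rs := pv_foldl_max_cases rs 0
    by_cases hall : (tasks.map pvStatusOf).all (fun s => s == "COMPLETED") = true
    · -- all COMPLETED → every rank 0 → W = 0
      have hW0 : W = 0 := by
        rcases hWmem with h | h
        · exact h
        · rw [hrs] at h; rcases List.mem_map.mp h with ⟨t, htm, ht⟩
          have := List.all_eq_true.mp hall (pvStatusOf t) (List.mem_map_of_mem htm)
          simp only [beq_iff_eq] at this
          rw [← ht, (pvRank_eq_zero_iff _).mpr this]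
      simp [hall, hW0]
    · -- not all COMPLETED → some rank ≥ 1 → W ≥ 1
      have hW1 : 1 ≤ W := by
        rw [List.all_eq_true] at hall; push Not at hall
        obtain ⟨s, hsm, hs⟩ := hall
        rcases List.mem_map.mp hsm with ⟨t, htm, ht⟩
        have hr : 1 ≤ pvRank (pvStatusOf t) := by
          have : pvStatusOf t ≠ "COMPLETED" := by rw [ht]; simpa using hs
          have := (pvRank_eq_zero_iff (pvStatusOf t)).not.mpr this
          omega
        exact le_trans hr (hmem_le _ (by rw [hrs]; exact List.mem_map_of_mem htm))
      simp only [if_neg hall]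
      by_cases herr : (tasks.map pvStatusOf).any (fun s => s == "ERROR") = true
      · -- some ERROR → W = 3
        have hW3' : W = 3 := by
          rcases List.any_eq_true.mp herr with ⟨s, hsm, hs⟩
          rcases List.mem_map.mp hsm with ⟨t, htm, ht⟩
          have : pvRank (pvStatusOf t) = 3 := (pvRank_eq_three_iff _).mpr (by rw [ht]; simpa using hs)
          have := hmem_le _ (show pvRank (pvStatusOf t) ∈ rs by rw [hrs]; exact List.mem_map_of_mem htm)
          omega
        simp [herr, hW3']
      · -- no ERROR → W ≠ 3
        have hWne3 : W ≠ 3 := by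
          intro h3
          rcases hWmem with h | h
          · omega
          · rw [hrs] at h; rcases List.mem_map.mp h with ⟨t, htm, ht⟩
            have : pvStatusOf t = "ERROR" := (pvRank_eq_three_iff _).mp (by omega)
            exact herr (List.any_eq_true.mpr ⟨pvStatusOf t, List.mem_map_of_mem htm, by simp [this]⟩)
        simp only [if_neg herr]
        by_cases hact : (tasks.map pvStatusOf).any (fun s => ["RUNNING", "WAITING"].contains s) = true
        · -- some active → W ≥ 2, ≠ 3 → W = 2
          have hW2 : W = 2 := by
            rcases List.any_eq_true.mp hact with ⟨s, hsm, hs⟩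
            rcases List.mem_map.mp hsm with ⟨t, htm, ht⟩
            have : 2 ≤ pvRank (pvStatusOf t) := (pvRank_ge_two_iff _).mpr (Or.inr (by rw [ht]; exact hs))
            have := hmem_le _ (show pvRank (pvStatusOf t) ∈ rs by rw [hrs]; exact List.mem_map_of_mem htm)
            omega
          rw [if_pos hact, hW2]; rfl
        · -- no error, no active → every rank ≤ 1 → W = 1
          have hWeq1 : W = 1 := by
            rcases hWmem with h | h
            · omega
            · rw [hrs] at h; rcases List.mem_map.mp h with ⟨t, htm, ht⟩
              by_contra hne
              have h2 : 2 ≤ pvRank (pvStatusOf t) := by omega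
              rcases (pvRank_ge_two_iff _).mp h2 with he | ha
              · exact herr (List.any_eq_true.mpr ⟨pvStatusOf t, List.mem_map_of_mem htm, by simp [he]⟩)
              · exact hact (List.any_eq_true.mpr ⟨pvStatusOf t, List.mem_map_of_mem htm, ha⟩)
          rw [if_neg hact, hWeq1]; rfl
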